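-- pv_equiv track=rewrite | github.com/usc-sail/mica-screenplay-parser | movieparser/create_data.py | merge_empty_lines_and_strip_non_empty_lines
-- ===== SOURCE A (Python) =====
-- def merge_empty_lines_and_strip_non_empty_lines(script, label=None):
--     if label is None:
--         label = ["XX" for _ in range(len(script))]
--     i = 0
--     new_script, new_label = [], []
--     while i < len(script):
--         if script[i].strip() == "":
--             j = i + 1
--             while j < len(script) and script[j].strip() == "":
--                 j += 1
--             if j < len(script) and i != 0:
--                 new_script.append("")
--                 new_label.append("O")
--             i = j
--         else:
--             new_script.append(script[i].strip())
--             new_label.append(label[i])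
--             i += 1
--     return new_script, new_label
-- ===== SOURCE B (Python) =====
-- def merge_empty_lines_and_strip_non_empty_lines(script, label=None):
--     new_script, new_label = [], []
--     pending = False
--     for i in range(len(script)):
--         s = script[i].strip()
--         if s == "":
--             if new_script:
--                 pending = True
--         else:
--             if pending:
--                 new_script.append("")
--                 new_label.append("O")
--                 pending = False
--             new_script.append(s)
--             new_label.append(label[i] if label is not None else "XX")
--     return new_script, new_label
-- ===== Notes on version B (the rewrite author's own statement) =====
-- stated objective: simpler
-- what changed: replaces A's nested while-loop lookahead that scans each blank run and decides up front whether to emit a separator with a single flat pass keeping a deferred pending-blank flag that emits the separator only when the next non-empty line arrives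
import Mathlib
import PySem

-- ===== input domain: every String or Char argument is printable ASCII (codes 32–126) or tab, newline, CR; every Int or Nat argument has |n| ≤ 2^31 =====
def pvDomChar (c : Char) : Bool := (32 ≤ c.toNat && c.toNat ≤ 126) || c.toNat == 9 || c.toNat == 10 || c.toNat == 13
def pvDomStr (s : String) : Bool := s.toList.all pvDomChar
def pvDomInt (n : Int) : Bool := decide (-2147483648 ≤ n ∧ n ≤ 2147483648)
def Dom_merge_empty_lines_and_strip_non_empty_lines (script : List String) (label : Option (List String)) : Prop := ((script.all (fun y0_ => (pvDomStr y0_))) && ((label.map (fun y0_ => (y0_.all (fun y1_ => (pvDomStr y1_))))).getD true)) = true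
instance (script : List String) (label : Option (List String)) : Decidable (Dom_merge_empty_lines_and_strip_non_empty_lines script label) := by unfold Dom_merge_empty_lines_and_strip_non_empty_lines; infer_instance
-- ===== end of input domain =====

-- B replaces A's nested while-loop lookahead over each blank run by a single flat pass with a
-- deferred pending-blank flag (simpler decomposition, same O(n) cost).

-- ===== PORT A =====
-- inner while loop of A: advance j over blank lines
def pvSkipA (script : List String) (j : Nat) : Nat :=
  if h : j < script.length then
    if PySem.Str.strip (script.getD j "") = "" then pvSkipA script (j + 1) else j
  else j
termination_by script.length - j

theorem pvSkipA_ge (script : List String) (j : Nat) : j ≤ pvSkipA script j := by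
  fun_induction pvSkipA script j with
  | case1 j h hb ih => omega
  | case2 => omega
  | case3 => omega

-- outer while loop of A, with the two accumulator lists
def pvGoA (script labels : List String) (i : Nat) (ns nl : List String) : List String × List String :=
  if h : i < script.length then
    if PySem.Str.strip (script.getD i "") = "" then
      let j := pvSkipA script (i + 1)
      if j < script.length ∧ i ≠ 0 then
        pvGoA script labels j (ns ++ [""]) (nl ++ ["O"])
      else
        pvGoA script labels j ns nl
    else
      pvGoA script labels (i + 1) (ns ++ [PySem.Str.strip (script.getD i "")]) (nl ++ [labels.getD i ""])
  else (ns, nl)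
termination_by script.length - i
decreasing_by
  · have := pvSkipA_ge script (i + 1); omega
  · have := pvSkipA_ge script (i + 1); omega
  · omega

def merge_empty_lines_and_strip_non_empty_lines (script : List String) (label : Option (List String)) : List String × List String :=
  let labels := match label with
    | none => (List.range script.length).map (fun _ => "XX")
    | some l => l
  pvGoA script labels 0 [] []

-- ===== PORT B =====
-- B's single for-loop with the deferred pending-blank flag
def pvGoB (script : List String) (label : Option (List String)) (i : Nat) (pending : Bool) (ns nl : List String) : List String × List String :=
  if h : i < script.length then
    let s := PySem.Str.strip (script.getD i "")
    if s = "" then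
      pvGoB script label (i + 1) (if ns ≠ [] then true else pending) ns nl
    else
      if pending then
        pvGoB script label (i + 1) false (ns ++ [""] ++ [s])
          (nl ++ ["O"] ++ [match label with | none => "XX" | some l => l.getD i ""])
      else
        pvGoB script label (i + 1) pending (ns ++ [s])
          (nl ++ [match label with | none => "XX" | some l => l.getD i ""])
  else (ns, nl)
termination_by script.length - i

def merge_empty_lines_and_strip_non_empty_lines_alt (script : List String) (label : Option (List String)) : List String × List String :=
  pvGoB script label 0 false [] []

-- ===== PRECONDITION & SPEC =====
-- Pre_ excludes exactly the inputs where Python A raises IndexError: an explicit label list that is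
-- too short to cover some non-blank line of the script (B raises the same IndexError there).
def Pre_merge_empty_lines_and_strip_non_empty_lines (script : List String) (label : Option (List String)) : Prop :=
  match label with
  | none => True
  | some l => ∀ i, i < script.length → PySem.Str.strip (script.getD i "") ≠ "" → i < l.length
instance (script : List String) (label : Option (List String)) : Decidable (Pre_merge_empty_lines_and_strip_non_empty_lines script label) := by unfold Pre_merge_empty_lines_and_strip_non_empty_lines; cases label <;> infer_instance

def pvWitness_merge_empty_lines_and_strip_non_empty_lines : List String × Option (List String) :=
  (["a", "", "", " b ", ""], some ["L", "M", "N", "P", "Q"])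

def Spec_merge_empty_lines_and_strip_non_empty_lines (script : List String) (label : Option (List String)) (out : List String × List String) : Prop := out = merge_empty_lines_and_strip_non_empty_lines_alt script label
instance (script : List String) (label : Option (List String)) (out : List String × List String) : Decidable (Spec_merge_empty_lines_and_strip_non_empty_lines script label out) := by unfold Spec_merge_empty_lines_and_strip_non_empty_lines; infer_instance

-- ===== CLAIM (what is proved, stated in full; the proofs are below) =====
def Claim_equal_merge_empty_lines_and_strip_non_empty_lines : Prop := ∀ (script : List String) (label : Option (List String)), Dom_merge_empty_lines_and_strip_non_empty_lines script label → Pre_merge_empty_lines_and_strip_non_empty_lines script label → Spec_merge_empty_lines_and_strip_non_empty_lines script label (merge_empty_lines_and_strip_non_empty_lines script label)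

-- ===== LEMMAS AND PROOFS =====

-- facts established by the inner while loop
theorem pvSkipA_facts (script : List String) (j : Nat) (hj : j ≤ script.length) :
    pvSkipA script j ≤ script.length ∧
    (∀ m, j ≤ m → m < pvSkipA script j → PySem.Str.strip (script.getD m "") = "") ∧
    (pvSkipA script j < script.length → PySem.Str.strip (script.getD (pvSkipA script j) "") ≠ "") := by
  fun_induction pvSkipA script j with
  | case1 j h hb ih =>
    obtain ⟨h1, h2, h3⟩ := ih (by omega)
    refine ⟨h1, ?_, h3⟩
    intro m hm1 hm2
    rcases Nat.eq_or_lt_of_le hm1 with rfl | hlt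
    · exact hb
    · exact h2 m hlt hm2
  | case2 j h hb => exact ⟨by omega, by intro m h1 h2; omega, fun _ => hb⟩
  | case3 j h => exact ⟨by omega, by intro m h1 h2; omega, fun hc => absurd hc h⟩

-- B's loop is unchanged over a stretch of blank lines once the pending flag is stable
theorem pvGoB_blank_run (script : List String) (label : Option (List String)) (p : Bool)
    (ns nl : List String) (hstab : ns ≠ [] → p = true) :
    ∀ (k j : Nat), k ≤ j → j ≤ script.length →
    (∀ m, k ≤ m → m < j → PySem.Str.strip (script.getD m "") = "") →
    pvGoB script label k p ns nl = pvGoB script label j p ns nl := by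
  intro k j hkj
  induction hkj with
  | refl => intro _ _; rfl
  | step hkj ih =>
    rename_i j'
    intro hj hbl
    rw [ih (by omega) (fun m h1 h2 => hbl m h1 (by omega))]
    rw [pvGoB.eq_def]
    have hlt : j' < script.length := by omega
    rw [dif_pos hlt, if_pos (hbl j' hkj (by omega))]
    have : (if ns ≠ [] then true else p) = p := by
      by_cases hns : ns = []
      · simp [hns]
      · simp [hns, hstab hns]
    rw [this]

-- main simulation lemma: A's outer loop from i with accumulators (ns, nl) equals B's loop from i
-- with pending = false, under the reachability invariants of A's loop
theorem pvMain (script labels : List String) (label : Option (List String))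
    (hlab : ∀ i, i < script.length → labels.getD i "" =
      match label with | none => "XX" | some l => l.getD i "")
    (i : Nat) (ns nl : List String)
    (h0 : i = 0 → ns = [])
    (hbl : i ≠ 0 → i < script.length → PySem.Str.strip (script.getD i "") = "" → ns ≠ []) :
    pvGoA script labels i ns nl = pvGoB script label i false ns nl := by
  rw [pvGoA, pvGoB.eq_def]
  by_cases hi : i < script.length
  · rw [dif_pos hi, dif_pos hi]
    by_cases hb : PySem.Str.strip (script.getD i "") = ""
    · rw [if_pos hb, if_pos hb]
      set j := pvSkipA script (i + 1) with hjdef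
      have hge : i + 1 ≤ j := pvSkipA_ge script (i + 1)
      obtain ⟨hjle, hrun, hnb⟩ := pvSkipA_facts script (i + 1) (by omega)
      have hp : (if ns ≠ [] then true else false) = decide (ns ≠ []) := by
        by_cases hns : ns = [] <;> simp [hns]
      rw [hp]
      have hrunB := pvGoB_blank_run script label (decide (ns ≠ [])) ns nl
        (fun hns => by simp [hns]) (i + 1) j hge hjle hrun
      rw [hrunB]
      by_cases hjlt : j < script.length
      · have hnbj := hnb hjlt
        by_cases hi0 : i = 0
        · have hns : ns = [] := h0 hi0
          rw [if_neg (by simp [hi0])]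
          subst hns
          -- both sides now sit at the non-blank line j with pending = false
          rw [pvGoA, pvGoB.eq_def, dif_pos hjlt, dif_pos hjlt, if_neg hnbj]
          simp only [ne_eq, not_true_eq_false, decide_false]
          rw [if_neg hnbj, if_neg (by simp), hlab j hjlt]
          exact pvMain script labels label hlab (j + 1) _ _ (by omega) (fun _ _ _ => by simp)
        · have hns : ns ≠ [] := hbl hi0 hi hb
          rw [if_pos ⟨hjlt, hi0⟩, decide_eq_true hns]
          rw [pvGoA, pvGoB.eq_def, dif_pos hjlt, dif_pos hjlt, if_neg hnbj, if_neg hnbj,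
            if_pos rfl, hlab j hjlt]
          have := pvMain script labels label hlab (j + 1)
            (ns ++ [""] ++ [PySem.Str.strip (script.getD j "")])
            (nl ++ ["O"] ++ [match label with | none => "XX" | some l => l.getD j ""])
            (by omega) (fun _ _ _ => by simp)
          simpa using this
      · -- the blank run reaches the end of the script: nothing more is emitted
        have hj : j = script.length := by omega
        rw [if_neg (by intro hc; exact hjlt hc.1), hj]
        rw [pvGoA, pvGoB.eq_def, dif_neg (lt_irrefl _), dif_neg (lt_irrefl _)]
    · rw [if_neg hb, if_neg hb, if_neg (by simp), hlab i hi]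
      exact pvMain script labels label hlab (i + 1) _ _ (by omega) (fun _ _ _ => by simp)
  · rw [dif_neg hi, dif_neg hi]
termination_by script.length - i
decreasing_by all_goals omega

-- ===== VERDICT (by name: the statement is the Claim_ definition above) =====
theorem merge_empty_lines_and_strip_non_empty_lines_spec : Claim_equal_merge_empty_lines_and_strip_non_empty_lines := by
  intro script label _ _
  unfold Spec_merge_empty_lines_and_strip_non_empty_lines
  unfold merge_empty_lines_and_strip_non_empty_lines merge_empty_lines_and_strip_non_empty_lines_alt
  refine (pvMain script _ label ?_ 0 [] [] (fun _ => rfl) (fun h _ _ => absurd rfl h)).symm ▸ rfl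
  intro i hi
  cases label with
  | none => simp [List.getD, hi]
  | some l => rfl
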